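-- pv_equiv track=rewrite | github.com/Ellie010707/coding-test-study | 프로그래머스/1/42840. 모의고사/모의고사.py | solution
-- ===== SOURCE A (Python) =====
-- def solution(answers):
--     answer = [0,0,0]
--
--     length = len(answers)
--     person1 = [1, 2, 3, 4, 5] * (length // 5 + 1)
--     person2 = [2, 1, 2, 3, 2, 4, 2, 5] * (length // 8 + 1)
--     person3 = [3, 3, 1, 1, 2, 2, 4, 4, 5, 5] * (length // 10 + 1)
--
--     for i, a in enumerate(answers):
--         if person1[i%5] == a: answer[0] += 1
--         if person2[i%8] == a: answer[1] += 1
--         if person3[i%10] == a: answer[2] += 1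
--
--     return [i+1 for i, a in enumerate(answer) if a == max(answer)]
-- ===== SOURCE B (Python) =====
-- def solution(answers):
--     # Histogram keyed by (position mod 40, answer); 40 = lcm(5, 8, 10), so a
--     # pattern's prediction at position i depends only on i mod 40.  Scoring a
--     # pattern is then a 40-term lookup sum, independent of the answers list.
--     hist = {}
--     for i, a in enumerate(answers):
--         key = (i % 40, a)
--         hist[key] = hist.get(key, 0) + 1
--     patterns = [[1, 2, 3, 4, 5],
--                 [2, 1, 2, 3, 2, 4, 2, 5],
--                 [3, 3, 1, 1, 2, 2, 4, 4, 5, 5]]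
--     scores = [sum(hist.get((j, p[j % len(p)]), 0) for j in range(40))
--               for p in patterns]
--     best = max(scores)
--     return [n + 1 for n, s in enumerate(scores) if s == best]
-- ===== Notes on version B (the rewrite author's own statement) =====
-- stated objective: alternative
-- what changed: Instead of comparing every answer against the three cyclic patterns, B builds a histogram keyed by (position mod 40, answer) in one pass (40 = lcm of the pattern lengths) and scores each pattern by a fixed 40-term dictionary-lookup sum, decoupling scoring from the answers list.
import Mathlib
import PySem

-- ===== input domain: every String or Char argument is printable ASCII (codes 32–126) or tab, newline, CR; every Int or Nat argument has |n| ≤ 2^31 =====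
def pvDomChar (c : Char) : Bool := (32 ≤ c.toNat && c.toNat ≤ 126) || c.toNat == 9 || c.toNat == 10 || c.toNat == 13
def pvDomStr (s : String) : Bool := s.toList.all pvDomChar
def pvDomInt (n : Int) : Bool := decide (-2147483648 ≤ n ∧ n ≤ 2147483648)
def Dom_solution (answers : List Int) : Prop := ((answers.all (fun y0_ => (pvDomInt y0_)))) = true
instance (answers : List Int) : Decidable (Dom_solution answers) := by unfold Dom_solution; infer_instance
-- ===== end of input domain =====

-- B replaces A's pass comparing each answer against three pre-replicated pattern lists by a
-- histogram keyed by (position mod 40, answer) — 40 = lcm of the pattern lengths — scored by a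
-- fixed 40-term lookup sum per pattern (objective: alternative).

-- ===== PORT A =====
-- person1/2/3[i%k] always hits the first copy, but the replication is ported literally;
-- pyGetD with default 0 is exact here because the index i%k is always in range.
def solution (answers : List Int) : List Int :=
  let length : Int := answers.length
  let person1 := PySem.List.pyRepeat [1, 2, 3, 4, 5] (PySem.Int.floordiv length 5 + 1)
  let person2 := PySem.List.pyRepeat [2, 1, 2, 3, 2, 4, 2, 5] (PySem.Int.floordiv length 8 + 1)
  let person3 := PySem.List.pyRepeat [3, 3, 1, 1, 2, 2, 4, 4, 5, 5] (PySem.Int.floordiv length 10 + 1)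
  let answer : Int × Int × Int :=
    (PySem.List.enumerate answers).foldl
      (fun ans q =>
        let ans := if PySem.List.pyGetD person1 (PySem.Int.mod q.1 5) 0 == q.2 then
                     (ans.1 + 1, ans.2.1, ans.2.2) else ans
        let ans := if PySem.List.pyGetD person2 (PySem.Int.mod q.1 8) 0 == q.2 then
                     (ans.1, ans.2.1 + 1, ans.2.2) else ans
        if PySem.List.pyGetD person3 (PySem.Int.mod q.1 10) 0 == q.2 then
          (ans.1, ans.2.1, ans.2.2 + 1) else ans)
      (0, 0, 0)
  let answerL : List Int := [answer.1, answer.2.1, answer.2.2]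
  let m := (PySem.List.max? answerL (fun y => y)).getD 0
  (PySem.List.enumerate answerL).filterMap (fun q => if q.2 == m then some (q.1 + 1) else none)

-- ===== PORT B =====
-- hist[key] = hist.get(key, 0) + 1 over keys (i % 40, a); then one 40-term lookup sum per
-- pattern.  p[j % len(p)] is ported as pyGetD … 0, exact because the index is always in range.
def solution_alt (answers : List Int) : List Int :=
  let hist : PySem.Dict (Int × Int) Int :=
    (PySem.List.enumerate answers).foldl
      (fun d q => d.insert (PySem.Int.mod q.1 40, q.2) (d.getD (PySem.Int.mod q.1 40, q.2) 0 + 1))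
      PySem.Dict.empty
  let patterns : List (List Int) :=
    [[1, 2, 3, 4, 5], [2, 1, 2, 3, 2, 4, 2, 5], [3, 3, 1, 1, 2, 2, 4, 4, 5, 5]]
  let scores := patterns.map (fun p =>
    ((PySem.List.pyRange 0 40 1).map
      (fun j => hist.getD (j, PySem.List.pyGetD p (PySem.Int.mod j (p.length : Int)) 0) 0)).sum)
  let best := (PySem.List.max? scores (fun y => y)).getD 0
  (PySem.List.enumerate scores).filterMap (fun q => if q.2 == best then some (q.1 + 1) else none)

-- ===== PRECONDITION & SPEC =====
def Spec_solution (answers : List Int) (out : List Int) : Prop := out = solution_alt answers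
instance (answers : List Int) (out : List Int) : Decidable (Spec_solution answers out) := by unfold Spec_solution; infer_instance

-- ===== CLAIM (what is proved, stated in full; the proofs are below) =====
def Claim_equal_solution : Prop := ∀ (answers : List Int), Dom_solution answers → Spec_solution answers (solution answers)

-- ===== LEMMAS AND PROOFS =====

lemma pv_mod_bounds (a b : Int) (hb : 0 < b) :
    0 ≤ PySem.Int.mod a b ∧ PySem.Int.mod a b < b :=
  ⟨PySem.Int.mod_nonneg a hb, PySem.Int.mod_lt a hb⟩

lemma pv_pyGetD_pyRepeat (base : List Int) (n j d : Int) (h1 : 1 ≤ n)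
    (h0 : 0 ≤ j) (hj : j < (base.length : Int)) :
    PySem.List.pyGetD (PySem.List.pyRepeat base n) j d = PySem.List.pyGetD base j d := by
  obtain ⟨m, hm⟩ : ∃ m, n.toNat = m + 1 := ⟨n.toNat - 1, by omega⟩
  have hflat : PySem.List.pyRepeat base n = base ++ (List.replicate m base).flatten := by
    simp [PySem.List.pyRepeat, hm, List.replicate_succ]
  have hle : (base.length : Int) ≤ ((base ++ (List.replicate m base).flatten).length : Int) := by
    push_cast [List.length_append]
    have : (0 : Int) ≤ ((List.replicate m base).flatten.length : Int) := by positivity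
    omega
  rw [hflat,
    PySem.List.pyGetD_eq_getElem _ d h0 (by omega),
    PySem.List.pyGetD_eq_getElem _ d h0 hj,
    List.getElem_append_left (by omega)]

lemma pv_countP_repeat (answers base : List Int) (k n : Int)
    (hk : (base.length : Int) = k) (hkpos : 0 < k) (hn : 1 ≤ n) :
    List.countP (fun q : Int × Int =>
        PySem.List.pyGetD (PySem.List.pyRepeat base n) (PySem.Int.mod q.1 k) 0 == q.2)
      (PySem.List.enumerate answers 0)
    = List.countP (fun q : Int × Int =>
        PySem.List.pyGetD base (PySem.Int.mod q.1 k) 0 == q.2)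
      (PySem.List.enumerate answers 0) := by
  apply List.countP_congr
  intro q _
  obtain ⟨h0, hlt⟩ := pv_mod_bounds q.1 k hkpos
  rw [pv_pyGetD_pyRepeat base n _ 0 hn h0 (by omega)]

lemma pv_floordiv_ge (a b : Int) (ha : 0 ≤ a) (hb : 0 < b) :
    1 ≤ PySem.Int.floordiv a b + 1 := by
  have := (PySem.Int.le_floordiv_iff_mul_le (a := a) (b := b) (q := 0) hb).mpr (by omega)
  omega

-- a fold updating three independent counters is three counts
lemma pv_triple_count (l : List (Int × Int)) (c1 c2 c3 : Int × Int → Bool) :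
    l.foldl (fun (ans : Int × Int × Int) q =>
        let ans := if c1 q then (ans.1 + 1, ans.2.1, ans.2.2) else ans
        let ans := if c2 q then (ans.1, ans.2.1 + 1, ans.2.2) else ans
        if c3 q then (ans.1, ans.2.1, ans.2.2 + 1) else ans) (0, 0, 0)
      = ((l.countP c1 : Int), ((l.countP c2 : Int), (l.countP c3 : Int))) := by
  have hfun : (fun (ans : Int × Int × Int) (q : Int × Int) =>
        let ans := if c1 q then (ans.1 + 1, ans.2.1, ans.2.2) else ans
        let ans := if c2 q then (ans.1, ans.2.1 + 1, ans.2.2) else ans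
        if c3 q then (ans.1, ans.2.1, ans.2.2 + 1) else ans)
      = (fun (s : Int × Int × Int) (e : Int × Int) =>
          ((fun (x : Int) (q : Int × Int) => if c1 q then x + 1 else x) s.1 e,
           (fun (yz : Int × Int) (q : Int × Int) =>
             ((fun (y : Int) (q : Int × Int) => if c2 q then y + 1 else y) yz.1 q,
              (fun (z : Int) (q : Int × Int) => if c3 q then z + 1 else z) yz.2 q)) s.2 e)) := by
    funext ans q
    dsimp only
    split_ifs <;> rfl
  have h1 := PySem.List.foldl_prod_mk
    (f := fun (x : Int) (q : Int × Int) => if c1 q then x + 1 else x)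
    (g := fun (yz : Int × Int) (q : Int × Int) =>
      ((fun (y : Int) (q : Int × Int) => if c2 q then y + 1 else y) yz.1 q,
       (fun (z : Int) (q : Int × Int) => if c3 q then z + 1 else z) yz.2 q))
    l (0 : Int) ((0, 0) : Int × Int)
  have h2 := PySem.List.foldl_prod_mk
    (f := fun (y : Int) (q : Int × Int) => if c2 q then y + 1 else y)
    (g := fun (z : Int) (q : Int × Int) => if c3 q then z + 1 else z)
    l (0 : Int) (0 : Int)
  rw [hfun, h1, h2, PySem.List.foldl_count_if, PySem.List.foldl_count_if,
      PySem.List.foldl_count_if]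
  norm_num

-- sum of a map that vanishes off one element of a Nodup list
lemma pv_sum_single (l : List Int) (m c : Int) (hnd : l.Nodup) (hm : m ∈ l) :
    (l.map (fun j => if j = m then c else 0)).sum = c := by
  induction l with
  | nil => cases hm
  | cons x t ih =>
    rcases List.mem_cons.mp hm with h | h
    · have hx : x = m := h.symm
      have hmt : m ∉ t := by rw [← hx]; exact (List.nodup_cons.mp hnd).1
      have ht0 : (t.map (fun j => if j = m then c else 0)).sum = 0 := by
        apply List.sum_eq_zero
        intro y hy
        obtain ⟨j, hj, rfl⟩ := List.mem_map.mp hy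
        have hne : j ≠ m := fun e => hmt (e ▸ hj)
        simp [hne]
      simp [hx, ht0]
    · have hx : x ≠ m := fun e => (List.nodup_cons.mp hnd).1 (e ▸ h)
      simp [hx, ih (List.nodup_cons.mp hnd).2 h]

-- partition of a count over residues mod 40 (k ∣ 40): the 40-term sum of per-class
-- counts equals A's direct count for the pattern p of length k
lemma pv_partition (l : List (Int × Int)) (p : List Int) (k : Int)
    (hkpos : 0 < k) (hdvd : k ∣ 40) :
    ((PySem.List.pyRange 0 40 1).map (fun j =>
        (l.countP (fun q => (PySem.Int.mod q.1 40, q.2)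
            == (j, PySem.List.pyGetD p (PySem.Int.mod j k) 0)) : Int))).sum
    = (l.countP (fun q => PySem.List.pyGetD p (PySem.Int.mod q.1 k) 0 == q.2) : Int) := by
  induction l with
  | nil => simp
  | cons a t ih =>
    have hcast : ∀ (c : Int × Int → Bool),
        ((a :: t).countP c : Int) = (t.countP c : Int) + (if c a then 1 else 0) := by
      intro c; rw [List.countP_cons]; push_cast; split_ifs <;> simp
    simp only [hcast]
    rw [PySem.List.sum_map_add_int, ih]
    congr 1
    obtain ⟨h0, hlt⟩ := pv_mod_bounds a.1 40 (by norm_num)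
    set m := PySem.Int.mod a.1 40 with hmdef
    have hpt : ((PySem.List.pyRange 0 40 1).map (fun j =>
        (if ((m, a.2) == (j, PySem.List.pyGetD p (PySem.Int.mod j k) 0)) then (1 : Int) else 0)))
        = (PySem.List.pyRange 0 40 1).map (fun j =>
            if j = m then (if a.2 == PySem.List.pyGetD p (PySem.Int.mod m k) 0 then (1 : Int) else 0) else 0) := by
      apply List.map_congr_left
      intro j _
      by_cases hj : j = m
      · subst hj; simp
      · have : ¬ ((m, a.2) == (j, PySem.List.pyGetD p (PySem.Int.mod j k) 0)) = true := by
          simp [Prod.ext_iff]; intro e; exact absurd e.symm hj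
        simp [hj, this]
    rw [hpt, pv_sum_single _ m _ (by decide) (PySem.List.mem_pyRange_one.mpr ⟨h0, hlt⟩)]
    have hmod : PySem.Int.mod m k = PySem.Int.mod a.1 k := by
      rw [hmdef, PySem.Int.mod_eq_emod_of_pos (by norm_num : (0:Int) < 40),
          PySem.Int.mod_eq_emod_of_pos hkpos, PySem.Int.mod_eq_emod_of_pos hkpos,
          Int.emod_emod_of_dvd a.1 hdvd]
    rw [hmod]
    have : (PySem.List.pyGetD p (PySem.Int.mod a.1 k) 0 == a.2)
         = (a.2 == PySem.List.pyGetD p (PySem.Int.mod a.1 k) 0) := by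
      simp [BEq.comm]
    rw [this]

-- B's histogram score for pattern p equals A's direct count, for k = len p, k ∣ 40
lemma pv_score_eq (answers p : List Int) (k : Int)
    (hk : (p.length : Int) = k) (hkpos : 0 < k) (hdvd : k ∣ 40) :
    ((PySem.List.pyRange 0 40 1).map (fun j =>
        ((PySem.List.enumerate answers 0).foldl
          (fun d q => d.insert (PySem.Int.mod q.1 40, q.2)
              (d.getD (PySem.Int.mod q.1 40, q.2) 0 + 1))
          PySem.Dict.empty).getD (j, PySem.List.pyGetD p (PySem.Int.mod j (p.length : Int)) 0) 0)).sum
    = ((PySem.List.enumerate answers 0).countP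
        (fun q => PySem.List.pyGetD p (PySem.Int.mod q.1 k) 0 == q.2) : Int) := by
  rw [hk]
  have hhist : (PySem.List.enumerate answers 0).foldl
      (fun d q => d.insert (PySem.Int.mod q.1 40, q.2) (d.getD (PySem.Int.mod q.1 40, q.2) 0 + 1))
      PySem.Dict.empty
      = PySem.Dict.counter ((PySem.List.enumerate answers 0).map
          (fun q => (PySem.Int.mod q.1 40, q.2))) := by
    rw [← PySem.Dict.foldl_insert_getD_add_one_eq_counter, List.foldl_map]
  rw [hhist]
  have hgd : ∀ j : Int,
      (PySem.Dict.counter ((PySem.List.enumerate answers 0).map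
          (fun q => (PySem.Int.mod q.1 40, q.2)))).getD
        (j, PySem.List.pyGetD p (PySem.Int.mod j k) 0) 0
      = ((PySem.List.enumerate answers 0).countP
          (fun q => (PySem.Int.mod q.1 40, q.2)
              == (j, PySem.List.pyGetD p (PySem.Int.mod j k) 0)) : Int) := by
    intro j
    rw [PySem.Dict.getD_counter, List.count_eq_countP, List.countP_map]
    congr 1
  simp only [hgd]
  exact pv_partition _ p k hkpos hdvd

-- ===== VERDICT (by name: the statement is the Claim_ definition above) =====
theorem solution_spec : Claim_equal_solution := by
  intro answers _
  unfold Spec_solution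
  show solution answers = solution_alt answers
  unfold solution solution_alt
  simp only [pv_triple_count]
  have hlen : (0 : Int) ≤ (answers.length : Int) := by positivity
  rw [pv_countP_repeat answers [1, 2, 3, 4, 5] 5 _ (by decide) (by decide)
        (pv_floordiv_ge _ 5 hlen (by decide)),
      pv_countP_repeat answers [2, 1, 2, 3, 2, 4, 2, 5] 8 _ (by decide) (by decide)
        (pv_floordiv_ge _ 8 hlen (by decide)),
      pv_countP_repeat answers [3, 3, 1, 1, 2, 2, 4, 4, 5, 5] 10 _ (by decide) (by decide)
        (pv_floordiv_ge _ 10 hlen (by decide))]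
  simp only [List.map_cons, List.map_nil]
  simp only [pv_score_eq answers [1, 2, 3, 4, 5] 5 (by decide) (by decide) (by decide),
      pv_score_eq answers [2, 1, 2, 3, 2, 4, 2, 5] 8 (by decide) (by decide) (by decide),
      pv_score_eq answers [3, 3, 1, 1, 2, 2, 4, 4, 5, 5] 10 (by decide) (by decide) (by decide)]
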